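-- pv_equiv track=rewrite | github.com/MattMills/radiocapture-rf | edacs_control_demod.py | bch_decode
-- ===== SOURCE A (Python) =====
-- def bch_decode(recd):
--   _M, _N, _L, _K,  = 6, 63, 48, 36
--
--   _GF_ALPHA = [1,2,4,8,16,32,3,6,12,24,48,35,5,10,20,40,19,38,15,30,60,59,53,41,17,34,7,14,28,56,51,37,9,18,36,11,22,44,27,54,47,29,58,55,45,25,50,39,13,26,52,43,21,42,23,46,31,62,63,61,57,49,33,0]
--   _GF_IDX = [-1,0,1,6,2,12,7,26,3,32,13,35,8,48,27,18,4,24,33,16,14,52,36,54,9,45,49,38,28,41,19,56,5,62,25,11,34,31,17,47,15,23,53,51,37,44,55,40,10,61,46,30,50,22,39,43,29,60,42,21,20,59,57,58]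
--   """decode BCH(48,36,5), return tuple(decoded 36 bits, (err locations)).
--      @recd - the received 48 bit, ordered by: 8_bit_COLOR_0, 28_bit_MSG, 12_bit_parity.
--      @return - check if the decoded msg is empty firstly!! you may use only data[8:8+28] slice.
--      @return - error location is described as in the @recd 48 bit range!
--   """
--   syn_err = False
--   s = [0,0,0,0,0]
--   s3 = 0
--   elp = [0,0,0]
--   loc = []
--   reg = [0,0,0]
--
--   #validate the input: string of 48 '0'|'1'.
--   if len(recd)!=48 or [x for x in recd if (x!='0' and x!='1')] : return ('', loc)
--
--   data = [int(x) for x in recd[::-1]]+[0]*15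
--   #print "data:", "".join([str(x) for x in data])
--
--   for i in range(1, 5):
--      s[i] = 0
--      for j in [x for x in range(0, _L) if data[x]==1]:
--         s[i] ^= _GF_ALPHA[(i*j) % _N]
--      if s[i]!=0 : syn_err = True
--      s[i] = _GF_IDX[s[i]];
--
--   #print "s", s[1:]
--
--   if not syn_err:   return (''.join(str(x) for x in data[47::-1]), loc)
--
--   if s[1] != -1:
--      s3 = (s[1]*3)%_N
--      if s[3]==s3:
--         data[s[1]] ^= 1
--         loc += [s[1]]
--      else:
--         if s[3]==-1:
--            aux = _GF_ALPHA[s3]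
--         else :
--            aux = _GF_ALPHA[s3]^_GF_ALPHA[s[3]]
--         #print "s3=", s3," ", "aux=",aux
--         elp[0], elp[1], elp[2] =  0, (s[2]-_GF_IDX[aux]+_N)%_N, (s[1]-_GF_IDX[aux]+_N)%_N
--         #print "elp/sigma=",elp
--         reg[1], reg[2] = elp[1], elp[2]
--         for i in range(1,64):
--            q = 1
--            for j in range(1,3):
--                if reg[j] != -1:
--                   reg[j] = (reg[j]+j)%_N
--                   q ^= _GF_ALPHA[reg[j]];
--            if q==0:  loc += [i%_N]
--         if len(loc) == 2 : data[loc[0]],data[loc[1]] = data[loc[0]]^1, data[loc[1]] ^ 1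
--         else:
--            data = ()
--            loc = [-100]
--            #print "incomplete decoded."
--   elif s[2]!=-1:
--       data = ()
--       loc += [-200]
--       #print "incomplete decoded."
--
--   if [x for x in loc if x>_L-1]: data = ()
--
--   return (''.join(str(x) for x in data[47::-1]), [i if i<0 else _L-i-1   for i in loc   ])
-- ===== SOURCE B (Python) =====
-- def bch_decode(recd):
--   # BCH(48,36,5) decoder by direct algebra: syndromes s1,s3 in one pass, then the
--   # error-locator quadratic z^2 + s1*z + (s3^s1^3)/s1 is solved in closed form with a
--   # 64-entry root table for w^2+w=c (no Chien search, no shift registers, no s2/s4: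
--   # they are the Frobenius squares of s1 and carry no information).
--   _N, _L = 63, 48
--
--   _GF_ALPHA = [1,2,4,8,16,32,3,6,12,24,48,35,5,10,20,40,19,38,15,30,60,59,53,41,17,34,7,14,28,56,51,37,9,18,36,11,22,44,27,54,47,29,58,55,45,25,50,39,13,26,52,43,21,42,23,46,31,62,63,61,57,49,33,0]
--   _GF_IDX = [-1,0,1,6,2,12,7,26,3,32,13,35,8,48,27,18,4,24,33,16,14,52,36,54,9,45,49,38,28,41,19,56,5,62,25,11,34,31,17,47,15,23,53,51,37,44,55,40,10,61,46,30,50,22,39,43,29,60,42,21,20,59,57,58]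
--   # _GF_ROOT[c] = some w with w^2 + w = c in GF(64), or -1 if the equation has no root
--   _GF_ROOT = [0,58,38,28,36,30,2,56,20,46,50,8,48,10,22,44,32,26,6,60,4,62,34,24,52,14,18,40,16,42,54,12] + [-1]*32
--
--   if len(recd) != 48 or any(c != '0' and c != '1' for c in recd):
--     return ('', [])
--
--   data = [1 if c == '1' else 0 for c in reversed(recd)] + [0] * 15
--
--   s1 = s3 = 0
--   for j in range(_L):
--     if data[j] == 1:
--       s1 ^= _GF_ALPHA[j % _N]
--       s3 ^= _GF_ALPHA[(3 * j) % _N]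
--
--   if s1 == 0:
--     # s3 != 0 would mean >2 errors; like the zero-syndrome case the word is returned as is
--     return (''.join(str(x) for x in reversed(data[:48])), [])
--
--   i1 = _GF_IDX[s1]
--   t = (3 * i1) % _N               # index of s1^3
--   if s3 == _GF_ALPHA[t]:          # s3 == s1^3: a single error at position i1
--     data[i1] ^= 1
--     loc = [i1]
--   else:
--     c = _GF_ALPHA[(_GF_IDX[s3 ^ _GF_ALPHA[t]] - t) % _N]   # (s3 ^ s1^3) / s1^3, nonzero
--     w = _GF_ROOT[c]
--     if w == -1:                   # quadratic has no roots: uncorrectable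
--       return ('', [-100])
--     # the two roots are s1*w and s1*(w^1); report them in Chien order (0 last)
--     p = (_GF_IDX[w] + i1) % _N
--     q = (_GF_IDX[w ^ 1] + i1) % _N
--     loc = sorted([p, q], key=lambda r: r if r else _N)
--     data[loc[0]], data[loc[1]] = data[loc[0]] ^ 1, data[loc[1]] ^ 1
--
--   if any(x > _L - 1 for x in loc):
--     return ('', [_L - 1 - i for i in loc])
--   return (''.join(str(x) for x in reversed(data[:48])), [_L - 1 - i for i in loc])
-- ===== Notes on version B (the rewrite author's own statement) =====
-- stated objective: faster
-- what changed: Replaces the 63-iteration Chien search with shift registers (and the s2/s4 syndrome passes feeding it) by closed-form algebra: one fused pass computes only s1 and s3, the single-error case is s3 == s1^3, and the two-error locator quadratic z^2 + s1*z + (s3^s1^3)/s1 is solved directly via a precomputed 64-entry root table for w^2+w=c, the two roots giving the error positions with no search loop.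
import Mathlib
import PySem

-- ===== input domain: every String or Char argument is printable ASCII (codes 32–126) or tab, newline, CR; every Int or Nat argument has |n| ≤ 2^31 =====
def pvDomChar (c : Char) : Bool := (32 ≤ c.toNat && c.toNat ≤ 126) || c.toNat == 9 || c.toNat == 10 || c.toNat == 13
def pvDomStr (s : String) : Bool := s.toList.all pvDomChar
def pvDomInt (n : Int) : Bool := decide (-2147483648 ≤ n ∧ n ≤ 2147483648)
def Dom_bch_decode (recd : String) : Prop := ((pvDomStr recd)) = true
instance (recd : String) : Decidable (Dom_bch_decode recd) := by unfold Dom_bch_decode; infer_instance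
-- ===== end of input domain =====

-- B replaces A's four syndrome passes and 63-step Chien register search by closed-form algebra:
-- only s1 and s3 are computed (one fused pass) and the error-locator quadratic is solved with a
-- 64-entry root table, the two roots giving the error positions directly (objective: faster).

-- shared literal tables and literal sub-expressions of both Pythons
def pvAlpha : List Int := [1,2,4,8,16,32,3,6,12,24,48,35,5,10,20,40,19,38,15,30,60,59,53,41,17,34,7,14,28,56,51,37,9,18,36,11,22,44,27,54,47,29,58,55,45,25,50,39,13,26,52,43,21,42,23,46,31,62,63,61,57,49,33,0]
def pvIdx : List Int := [-1,0,1,6,2,12,7,26,3,32,13,35,8,48,27,18,4,24,33,16,14,52,36,54,9,45,49,38,28,41,19,56,5,62,25,11,34,31,17,47,15,23,53,51,37,44,55,40,10,61,46,30,50,22,39,43,29,60,42,21,20,59,57,58]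
-- int(x) resp. B's '1 if c=='1' else 0': exact here, reached only on validated chars '0'/'1'
def pvBit (c : Char) : Int := if c = '1' then 1 else 0
-- data = [.. for x in recd[::-1]] + [0]*15  (same value-level expression in both Pythons)
def pvData (recd : String) : List Int := recd.toList.reverse.map pvBit ++ List.replicate 15 0
-- ''.join(str(x) for x in data[47::-1]) resp. reversed(data[:48]): data has length 63 here, so both are (take 48).reverse (exact)
def pvOut (d : List Int) : String := String.ofList ((d.take 48).reverse.flatMap PySem.Int.toChars)

-- ===== PORT A =====
-- inner loop: for j in [x for x in range(0,48) if data[x]==1]: s ^= _GF_ALPHA[(i*j) % 63]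
def pvSynSumA (data : List Int) (i : Int) : Int :=
  (((PySem.List.pyRange 0 48).filter (fun x => PySem.List.pyGetD data x 0 == 1)).foldl
    (fun acc j => PySem.Int.bxor acc (PySem.List.pyGetD pvAlpha (PySem.Int.mod (i * j) 63) 0)) 0)

-- outer loop i=1..4 over state (s, syn_err); s[i] = _GF_IDX[s[i]] (index i ∈ 1..4 nonneg: .toNat exact)
def pvSynStageA (data : List Int) : List Int × Bool :=
  (PySem.List.pyRange 1 5).foldl
    (fun st i =>
      let v := pvSynSumA data i
      (st.1.set i.toNat (PySem.List.pyGetD pvIdx v 0), if v ≠ 0 then true else st.2))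
    ([0, 0, 0, 0, 0], false)

-- one Chien iteration: inner loop j=1..2 over (reg, q) with q starting at 1, then maybe append i%63
def pvChienStepA (st : List Int × List Int) (i : Int) : List Int × List Int :=
  let inner := (PySem.List.pyRange 1 3).foldl
    (fun (rq : List Int × Int) j =>
      if PySem.List.pyGetD rq.1 j 0 ≠ -1 then
        let r := PySem.Int.mod (PySem.List.pyGetD rq.1 j 0 + j) 63
        (rq.1.set j.toNat r, PySem.Int.bxor rq.2 (PySem.List.pyGetD pvAlpha r 0))
      else rq) (st.1, 1)
  (inner.1, if inner.2 = 0 then st.2 ++ [PySem.Int.mod i 63] else st.2)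

-- for i in range(1,64): ... with reg = [0, elp[1], elp[2]], loc = []
def pvChienA (elp1 elp2 : Int) : List Int :=
  ((PySem.List.pyRange 1 64).foldl pvChienStepA ([0, elp1, elp2], [])).2

-- if len(loc)==2: flip both positions (tuple assignment: both right-hand sides read the
-- ORIGINAL data) else incomplete decode: data=(), loc=[-100]
def pvTwoA (data0 : List Int) (loc : List Int) : Option (List Int) × List Int :=
  if loc.length = 2 then
    let l0 := PySem.List.pyGetD loc 0 0
    let l1 := PySem.List.pyGetD loc 1 0
    (some ((data0.set l0.toNat (PySem.Int.bxor (PySem.List.pyGetD data0 l0 0) 1)).set l1.toNat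
             (PySem.Int.bxor (PySem.List.pyGetD data0 l1 0) 1)), loc)
  else (none, [-100])

-- error-correction stage; the Python's "data = ()" is the none case of the Option
def pvCorrA (data0 : List Int) (s1 s2 s3v : Int) : Option (List Int) × List Int :=
    if s1 ≠ -1 then
      let s3 := PySem.Int.mod (s1 * 3) 63
      if s3v = s3 then
        -- data[s[1]] ^= 1 : s[1] ∈ 0..62 (a _GF_IDX value ≠ -1), in range, .toNat exact
        (some (data0.set s1.toNat (PySem.Int.bxor (PySem.List.pyGetD data0 s1 0) 1)), [] ++ [s1])
      else
        let aux := if s3v = -1 then PySem.List.pyGetD pvAlpha s3 0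
                   else PySem.Int.bxor (PySem.List.pyGetD pvAlpha s3 0) (PySem.List.pyGetD pvAlpha s3v 0)
        let elp1 := PySem.Int.mod (s2 - PySem.List.pyGetD pvIdx aux 0 + 63) 63
        let elp2 := PySem.Int.mod (s1 - PySem.List.pyGetD pvIdx aux 0 + 63) 63
        pvTwoA data0 (pvChienA elp1 elp2)
    else if s2 ≠ -1 then (none, [] ++ [-200])
    else (some data0, [])

-- everything after input validation
def pvRestA (data0 : List Int) : String × List Int :=
  let st := pvSynStageA data0
  if st.2 = false then (pvOut data0, []) else
  let res := pvCorrA data0 (PySem.List.pyGetD st.1 1 0) (PySem.List.pyGetD st.1 2 0)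
    (PySem.List.pyGetD st.1 3 0)
  let dataF := if (res.2.filter (fun x => decide (x > 47))) ≠ [] then none else res.1
  ((match dataF with | none => "" | some d => pvOut d),
   res.2.map (fun i => if i < 0 then i else 48 - i - 1))

def bch_decode (recd : String) : String × List Int :=
  if recd.toList.length ≠ 48 ∨ (recd.toList.filter (fun c => decide (c ≠ '0') && decide (c ≠ '1'))) ≠ [] then
    ("", [])
  else pvRestA (pvData recd)

-- ===== PORT B =====
-- _GF_ROOT[c] = some w with w^2 + w = c in GF(64), or -1 if the equation has no root
def pvRootT : List Int := [0,58,38,28,36,30,2,56,20,46,50,8,48,10,22,44,32,26,6,60,4,62,34,24,52,14,18,40,16,42,54,12] ++ List.replicate 32 (-1)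

-- one fused pass j=0..47 accumulating (s1, s3)
def pvSynB (data : List Int) : Int × Int :=
  (PySem.List.pyRange 0 48).foldl
    (fun t j =>
      if PySem.List.pyGetD data j 0 == 1 then
        (PySem.Int.bxor t.1 (PySem.List.pyGetD pvAlpha (PySem.Int.mod j 63) 0),
         PySem.Int.bxor t.2 (PySem.List.pyGetD pvAlpha (PySem.Int.mod (3 * j) 63) 0))
      else t)
    (0, 0)

-- common tail of Source B: the >47 guard and the two return statements
def pvTailB (data : List Int) (loc : List Int) : String × List Int :=
  if loc.any (fun x => decide (x > 47)) then ("", loc.map (fun i => 48 - 1 - i))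
  else (pvOut data, loc.map (fun i => 48 - 1 - i))

def pvRestB (data : List Int) : String × List Int :=
  let t := pvSynB data
  if t.1 = 0 then (pvOut data, []) else
  let i1 := PySem.List.pyGetD pvIdx t.1 0
  let tt := PySem.Int.mod (3 * i1) 63
  if t.2 = PySem.List.pyGetD pvAlpha tt 0 then
    -- single error at position i1 (i1 ∈ 0..62, in range, .toNat exact)
    pvTailB (data.set i1.toNat (PySem.Int.bxor (PySem.List.pyGetD data i1 0) 1)) [i1]
  else
    let c := PySem.List.pyGetD pvAlpha
      (PySem.Int.mod (PySem.List.pyGetD pvIdx (PySem.Int.bxor t.2 (PySem.List.pyGetD pvAlpha tt 0)) 0 - tt) 63) 0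
    let w := PySem.List.pyGetD pvRootT c 0
    if w = -1 then ("", [-100]) else
    let p := PySem.Int.mod (PySem.List.pyGetD pvIdx w 0 + i1) 63
    let q := PySem.Int.mod (PySem.List.pyGetD pvIdx (PySem.Int.bxor w 1) 0 + i1) 63
    -- sorted([p, q], key=lambda r: r if r else 63)
    let loc := PySem.List.sorted [p, q] (fun r => if r = 0 then (63 : Int) else r) false
    -- tuple assignment: both right-hand sides read the ORIGINAL data
    pvTailB ((data.set (PySem.List.pyGetD loc 0 0).toNat
                (PySem.Int.bxor (PySem.List.pyGetD data (PySem.List.pyGetD loc 0 0) 0) 1)).set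
              (PySem.List.pyGetD loc 1 0).toNat
                (PySem.Int.bxor (PySem.List.pyGetD data (PySem.List.pyGetD loc 1 0) 0) 1)) loc

def bch_decode_alt (recd : String) : String × List Int :=
  if recd.toList.length ≠ 48 ∨ recd.toList.any (fun c => decide (c ≠ '0') && decide (c ≠ '1')) = true then
    ("", [])
  else pvRestB (pvData recd)

-- ===== PRECONDITION & SPEC =====
def Spec_bch_decode (recd : String) (out : String × List Int) : Prop := out = bch_decode_alt recd
instance (recd : String) (out : String × List Int) : Decidable (Spec_bch_decode recd out) := by unfold Spec_bch_decode; infer_instance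

-- ===== CLAIM (what is proved, stated in full; the proofs are below) =====
def Claim_equal_bch_decode : Prop := ∀ (recd : String), Dom_bch_decode recd → Spec_bch_decode recd (bch_decode recd)

-- ===== LEMMAS AND PROOFS =====

lemma pv_filter_ne_nil_iff_any {α : Type} (l : List α) (p : α → Bool) :
    l.filter p ≠ [] ↔ l.any p = true := by
  simp [List.filter_eq_nil_iff, List.any_eq_true]

lemma pv_mod_shift (a b : Int) :
    PySem.Int.mod (PySem.Int.mod a 63 + b) 63 = PySem.Int.mod (a + b) 63 := by
  rw [PySem.Int.mod_eq_emod_of_pos (by norm_num), PySem.Int.mod_eq_emod_of_pos (by norm_num),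
    PySem.Int.mod_eq_emod_of_pos (by norm_num)]
  omega

-- A's Chien fold in direct filter form
def pvChienFilt (e1 e2 : Int) : List Int :=
  ((PySem.List.pyRange 1 64).filter (fun i =>
      PySem.Int.bxor (PySem.Int.bxor 1 (PySem.List.pyGetD pvAlpha (PySem.Int.mod (e1 + i) 63) 0))
        (PySem.List.pyGetD pvAlpha (PySem.Int.mod (e2 + 2 * i) 63) 0) == 0)).map
    (fun i => PySem.Int.mod i 63)

lemma pv_chien_step (r1 r2 : Int) (hr1 : 0 ≤ r1) (hr2 : 0 ≤ r2) (loc : List Int) (i : Int) :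
    pvChienStepA ([0, r1, r2], loc) i =
    ([0, PySem.Int.mod (r1 + 1) 63, PySem.Int.mod (r2 + 2) 63],
     if PySem.Int.bxor (PySem.Int.bxor 1 (PySem.List.pyGetD pvAlpha (PySem.Int.mod (r1 + 1) 63) 0))
          (PySem.List.pyGetD pvAlpha (PySem.Int.mod (r2 + 2) 63) 0) = 0
     then loc ++ [PySem.Int.mod i 63] else loc) := by
  have h3 : PySem.List.pyRange 1 3 = [1, 2] := by decide
  have hne1 : r1 ≠ -1 := by omega
  have hne2 : r2 ≠ -1 := by omega
  simp only [pvChienStepA, h3, List.foldl_cons, List.foldl_nil]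
  simp [PySem.List.pyGetD, PySem.List.pyGet?, PySem.List.pyIdx?, hne1, hne2, List.set]

lemma pv_chien_aux (e1 e2 : Int) (h1 : 0 ≤ e1) (h1' : e1 < 63) (h2 : 0 ≤ e2) (h2' : e2 < 63)
    (l0 : List Int) (n : Nat) :
    (PySem.List.pyRange 1 (1 + (n : Int))).foldl pvChienStepA ([0, e1, e2], l0) =
    ([0, PySem.Int.mod (e1 + (n : Int)) 63, PySem.Int.mod (e2 + 2 * (n : Int)) 63],
     l0 ++ ((PySem.List.pyRange 1 (1 + (n : Int))).filter (fun i =>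
         PySem.Int.bxor (PySem.Int.bxor 1 (PySem.List.pyGetD pvAlpha (PySem.Int.mod (e1 + i) 63) 0))
           (PySem.List.pyGetD pvAlpha (PySem.Int.mod (e2 + 2 * i) 63) 0) == 0)).map
       (fun i => PySem.Int.mod i 63)) := by
  induction n with
  | zero =>
    have h0 : PySem.List.pyRange 1 (1 + ((0 : Nat) : Int)) = [] := by decide
    rw [h0]
    simp
    constructor <;> omega
  | succ k ih =>
    have hcast : (1 + ((k + 1 : Nat) : Int)) = (1 + (k : Int)) + 1 := by push_cast; ring
    rw [hcast, PySem.List.pyRange_one_succ_right (by omega), List.foldl_append, ih,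
      List.foldl_cons, List.foldl_nil,
      pv_chien_step _ _ (PySem.Int.mod_nonneg _ (by norm_num)) (PySem.Int.mod_nonneg _ (by norm_num)),
      pv_mod_shift, pv_mod_shift, List.filter_append, List.map_append]
    have ha1 : e1 + (k : Int) + 1 = e1 + (1 + (k : Int)) := by ring
    have ha2 : e2 + 2 * (k : Int) + 2 = e2 + 2 * (1 + (k : Int)) := by ring
    rw [ha1, ha2]
    have hc1 : ((k : Int) + 1) = 1 + (k : Int) := by ring
    simp only [Nat.cast_add, Nat.cast_one, hc1, List.filter_cons, List.filter_nil]
    by_cases hq : PySem.Int.bxor (PySem.Int.bxor 1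
          (PySem.List.pyGetD pvAlpha (PySem.Int.mod (e1 + (1 + (k : Int))) 63) 0))
        (PySem.List.pyGetD pvAlpha (PySem.Int.mod (e2 + 2 * (1 + (k : Int))) 63) 0) = 0 <;>
      simp only [PySem.Int.mod_eq_emod_of_pos (show (0:Int) < 63 by norm_num)] at hq <;>
      simp [hq, List.append_assoc]

lemma pv_chien_eq (e1 e2 : Int) (h1 : 0 ≤ e1) (h1' : e1 < 63) (h2 : 0 ≤ e2) (h2' : e2 < 63) :
    pvChienA e1 e2 = pvChienFilt e1 e2 := by
  have h := pv_chien_aux e1 e2 h1 h1' h2 h2' [] 63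
  norm_num at h
  simp [pvChienA, pvChienFilt, h]

-- the three tables packed into single naturals, 6 bits per entry (idx/root entries stored +1)
def pvTA : Nat := 324948975432320371080866489111452917039159851672880359415289456819899054707732937472241880484391502374330200768641
def pvTI : Nat := 36890731582035082113852464715425541196792728777988190508044849444042097813389759671391095610362948708331422889025600
def pvTR : Nat := 1360359792089089629168782074315364446522964545569719484097
def aN (k : Nat) : Nat := (pvTA >>> (6 * k)) % 64
def iN (v : Nat) : Int := (((pvTI >>> (6 * v)) % 64 : Nat) : Int) - 1
def rN (c : Nat) : Int := (((pvTR >>> (6 * c)) % 64 : Nat) : Int) - 1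

lemma aN_lt (k : Nat) : aN k < 64 := Nat.mod_lt _ (by norm_num)

set_option maxRecDepth 300000 in
lemma bridge_alpha : ∀ k < 64, PySem.List.pyGetD pvAlpha ((k : Nat) : Int) 0 = ((aN k : Nat) : Int) := by decide

set_option maxRecDepth 300000 in
lemma bridge_idx : ∀ v < 64, PySem.List.pyGetD pvIdx ((v : Nat) : Int) 0 = iN v := by decide

set_option maxRecDepth 300000 in
lemma bridge_root : ∀ c < 64, PySem.List.pyGetD pvRootT ((c : Nat) : Int) 0 = rN c := by decide

lemma bridge_alpha' (x : Int) (h0 : 0 ≤ x) (h : x < 64) :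
    PySem.List.pyGetD pvAlpha x 0 = ((aN x.toNat : Nat) : Int) := by
  have := bridge_alpha x.toNat (by omega)
  rwa [Int.toNat_of_nonneg h0] at this

-- the same lookups as Int-typed functions, for the fast mirrors of the two tails
def alphaI (x : Int) : Int := ((aN x.toNat : Nat) : Int)
def idxI (x : Int) : Int := iN x.toNat
def rootI (x : Int) : Int := rN x.toNat

lemma alpha_fast (x : Int) (h0 : 0 ≤ x) (h : x < 64) :
    PySem.List.pyGetD pvAlpha x 0 = alphaI x := bridge_alpha' x h0 h

lemma idx_fast (x : Int) (h0 : 0 ≤ x) (h : x < 64) :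
    PySem.List.pyGetD pvIdx x 0 = idxI x := by
  have := bridge_idx x.toNat (by omega)
  unfold idxI
  rwa [Int.toNat_of_nonneg h0] at this

lemma root_fast (x : Int) (h0 : 0 ≤ x) (h : x < 64) :
    PySem.List.pyGetD pvRootT x 0 = rootI x := by
  have := bridge_root x.toNat (by omega)
  unfold rootI
  rwa [Int.toNat_of_nonneg h0] at this

lemma alphaI_bounds (x : Int) : 0 ≤ alphaI x ∧ alphaI x < 64 := by
  have := aN_lt x.toNat
  unfold alphaI
  omega

lemma idxI_bounds (x : Int) : -1 ≤ idxI x ∧ idxI x < 63 := by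
  have : (pvTI >>> (6 * x.toNat)) % 64 < 64 := Nat.mod_lt _ (by norm_num)
  unfold idxI iN
  omega

lemma rootI_bounds (x : Int) : -1 ≤ rootI x ∧ rootI x < 63 := by
  have : (pvTR >>> (6 * x.toNat)) % 64 < 64 := Nat.mod_lt _ (by norm_num)
  unfold rootI rN
  omega

lemma bxor_lt64 (x y : Int) (hx0 : 0 ≤ x) (hx : x < 64) (hy0 : 0 ≤ y) (hy : y < 64) :
    0 ≤ PySem.Int.bxor x y ∧ PySem.Int.bxor x y < 64 := by
  rw [show x = ((x.toNat : Nat) : Int) from (Int.toNat_of_nonneg hx0).symm,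
    show y = ((y.toNat : Nat) : Int) from (Int.toNat_of_nonneg hy0).symm,
    PySem.Int.bxor_natCast]
  have hx : x.toNat ^^^ y.toNat < 64 := Nat.xor_lt_two_pow (n := 6) (by omega) (by omega)
  omega

-- A's Chien, computed over Nat with the packed table, one fold over a literal range
def pvRange63 : List Nat := [1, 2, 3, 4, 5, 6, 7, 8, 9, 10, 11, 12, 13, 14, 15, 16, 17, 18, 19, 20, 21, 22, 23, 24, 25, 26, 27, 28, 29, 30, 31, 32, 33, 34, 35, 36, 37, 38, 39, 40, 41, 42, 43, 44, 45, 46, 47, 48, 49, 50, 51, 52, 53, 54, 55, 56, 57, 58, 59, 60, 61, 62, 63]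

def pvChienFast (e1 e2 : Nat) : List Int :=
  pvRange63.foldr
    (fun i acc => if (1 ^^^ aN ((e1 + i) % 63) ^^^ aN ((e2 + 2 * i) % 63)) == 0
                  then ((i % 63 : Nat) : Int) :: acc else acc) []

lemma foldr_filter_map {p : Nat → Bool} {f : Nat → Int} (l : List Nat) :
    l.foldr (fun i acc => if p i then f i :: acc else acc) [] = (l.filter p).map f := by
  induction l with
  | nil => rfl
  | cons x l ih =>
    simp only [List.foldr_cons, List.filter_cons, ih]
    by_cases h : p x <;> simp [h]

lemma pvRange_1_64 : PySem.List.pyRange 1 64 = pvRange63.map (fun k => ((k : Nat) : Int)) := by decide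

lemma pv_mod_cast63 (m : Nat) : PySem.Int.mod ((m : Nat) : Int) (63 : Int) = ((m % 63 : Nat) : Int) := by
  exact_mod_cast PySem.Int.mod_natCast m 63

lemma chien_fast (e1 e2 : Nat) :
    pvChienFilt ((e1 : Nat) : Int) ((e2 : Nat) : Int) = pvChienFast e1 e2 := by
  unfold pvChienFilt pvChienFast
  rw [foldr_filter_map, pvRange_1_64, List.filter_map, List.map_map]
  have hpred : ∀ i ∈ pvRange63,
      ((fun i : Int => PySem.Int.bxor (PySem.Int.bxor 1 (PySem.List.pyGetD pvAlpha (PySem.Int.mod (((e1 : Nat) : Int) + i) 63) 0))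
          (PySem.List.pyGetD pvAlpha (PySem.Int.mod (((e2 : Nat) : Int) + 2 * i) 63) 0) == 0) ∘ (fun k : Nat => ((k : Nat) : Int))) i
      = ((1 ^^^ aN ((e1 + i) % 63) ^^^ aN ((e2 + 2 * i) % 63)) == 0) := by
    intro i _
    show (PySem.Int.bxor (PySem.Int.bxor 1 (PySem.List.pyGetD pvAlpha (PySem.Int.mod ((e1 : Int) + (i : Int)) 63) 0))
        (PySem.List.pyGetD pvAlpha (PySem.Int.mod ((e2 : Int) + 2 * (i : Int)) 63) 0) == 0)
      = ((1 ^^^ aN ((e1 + i) % 63) ^^^ aN ((e2 + 2 * i) % 63)) == 0)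
    have c1 : (e1 : Int) + (i : Int) = ((e1 + i : Nat) : Int) := by push_cast; ring
    have c2 : (e2 : Int) + 2 * (i : Int) = ((e2 + 2 * i : Nat) : Int) := by push_cast; ring
    rw [c1, c2, pv_mod_cast63, pv_mod_cast63,
      bridge_alpha _ (by have := Nat.mod_lt (e1 + i) (show 0 < 63 by norm_num); omega),
      bridge_alpha _ (by have := Nat.mod_lt (e2 + 2 * i) (show 0 < 63 by norm_num); omega),
      show (1 : Int) = ((1 : Nat) : Int) from rfl,
      PySem.Int.bxor_natCast, PySem.Int.bxor_natCast]
    by_cases h : (1 ^^^ aN ((e1 + i) % 63) ^^^ aN ((e2 + 2 * i) % 63)) = 0 <;> simp [h]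
  rw [List.filter_congr hpred]
  apply List.map_congr_left
  intro i _
  exact pv_mod_cast63 i

lemma chienA_mod (x y : Int) :
    pvChienA (PySem.Int.mod x 63) (PySem.Int.mod y 63) =
    pvChienFast (PySem.Int.mod x 63).toNat (PySem.Int.mod y 63).toNat := by
  have hx0 := PySem.Int.mod_nonneg x (show (0:Int) < 63 by norm_num)
  have hx1 := PySem.Int.mod_lt x (show (0:Int) < 63 by norm_num)
  have hy0 := PySem.Int.mod_nonneg y (show (0:Int) < 63 by norm_num)
  have hy1 := PySem.Int.mod_lt y (show (0:Int) < 63 by norm_num)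
  rw [pv_chien_eq _ _ hx0 hx1 hy0 hy1,
    show PySem.Int.mod x 63 = ((PySem.Int.mod x 63).toNat : Int) from (Int.toNat_of_nonneg hx0).symm,
    show PySem.Int.mod y 63 = ((PySem.Int.mod y 63).toNat : Int) from (Int.toNat_of_nonneg hy0).symm,
    chien_fast _ _, Int.toNat_natCast, Int.toNat_natCast]

-- Frobenius squaring on the table representation
def sqGF (v : Int) : Int :=
  if v = 0 then 0
  else PySem.List.pyGetD pvAlpha (PySem.Int.mod (2 * PySem.List.pyGetD pvIdx v 0) 63) 0

set_option maxRecDepth 300000 in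
lemma sq_hom : ∀ a < 64, ∀ b < 64,
    sqGF (PySem.Int.bxor ((a : Nat) : Int) ((b : Nat) : Int)) =
    PySem.Int.bxor (sqGF ((a : Nat) : Int)) (sqGF ((b : Nat) : Int)) := by decide

set_option maxRecDepth 300000 in
lemma term2N : ∀ j < 48, PySem.List.pyGetD pvAlpha (PySem.Int.mod (2 * ((j : Nat) : Int)) 63) 0 =
    sqGF (PySem.List.pyGetD pvAlpha (PySem.Int.mod (1 * ((j : Nat) : Int)) 63) 0) := by decide

set_option maxRecDepth 300000 in
lemma term4N : ∀ j < 48, PySem.List.pyGetD pvAlpha (PySem.Int.mod (4 * ((j : Nat) : Int)) 63) 0 =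
    sqGF (PySem.List.pyGetD pvAlpha (PySem.Int.mod (2 * ((j : Nat) : Int)) 63) 0) := by decide

lemma syn_sq_fold (m m2 : Int)
    (hterm : ∀ j : Int, 0 ≤ j → j < 48 →
      PySem.List.pyGetD pvAlpha (PySem.Int.mod (m2 * j) 63) 0 =
        sqGF (PySem.List.pyGetD pvAlpha (PySem.Int.mod (m * j) 63) 0))
    (L : List Int) (hL : ∀ j ∈ L, 0 ≤ j ∧ j < 48) :
    ∀ a : Nat, a < 64 →
    L.foldl (fun acc j => PySem.Int.bxor acc (PySem.List.pyGetD pvAlpha (PySem.Int.mod (m2 * j) 63) 0)) (sqGF ((a : Nat) : Int))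
      = sqGF (L.foldl (fun acc j => PySem.Int.bxor acc (PySem.List.pyGetD pvAlpha (PySem.Int.mod (m * j) 63) 0)) ((a : Nat) : Int)) := by
  induction L with
  | nil => intro a ha; simp
  | cons j L ih =>
    intro a ha
    obtain ⟨hj0, hj48⟩ := hL j (List.mem_cons_self)
    have ihL := fun a ha => ih (fun x hx => hL x (List.mem_cons_of_mem _ hx)) a ha
    simp only [List.foldl_cons]
    have hnn : 0 ≤ PySem.Int.mod (m * j) 63 := PySem.Int.mod_nonneg _ (by norm_num)
    have hlt : PySem.Int.mod (m * j) 63 < 63 := PySem.Int.mod_lt _ (by norm_num)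
    have hα : PySem.List.pyGetD pvAlpha (PySem.Int.mod (m * j) 63) 0 =
        ((aN (PySem.Int.mod (m * j) 63).toNat : Nat) : Int) := bridge_alpha' _ hnn (by omega)
    rw [hterm j hj0 hj48, hα, ← sq_hom a ha _ (aN_lt _), PySem.Int.bxor_natCast]
    exact ihL _ (Nat.xor_lt_two_pow (n := 6) ha (aN_lt _))

lemma syn_range_fold (i : Int) (L : List Int) :
    ∀ a : Nat, a < 64 → ∃ mo : Nat, mo < 64 ∧
    L.foldl (fun acc j => PySem.Int.bxor acc (PySem.List.pyGetD pvAlpha (PySem.Int.mod (i * j) 63) 0)) ((a : Nat) : Int) = ((mo : Nat) : Int) := by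
  induction L with
  | nil => intro a ha; exact ⟨a, ha, by simp⟩
  | cons j L ih =>
    intro a ha
    simp only [List.foldl_cons]
    have hnn : 0 ≤ PySem.Int.mod (i * j) 63 := PySem.Int.mod_nonneg _ (by norm_num)
    have hlt : PySem.Int.mod (i * j) 63 < 63 := PySem.Int.mod_lt _ (by norm_num)
    rw [bridge_alpha' _ hnn (by omega), PySem.Int.bxor_natCast]
    exact ih _ (Nat.xor_lt_two_pow (n := 6) ha (aN_lt _))

lemma pv_filter_bounds (d : List Int) :
    ∀ j ∈ (PySem.List.pyRange 0 48).filter (fun x => PySem.List.pyGetD d x 0 == 1), 0 ≤ j ∧ j < 48 := by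
  intro j hj
  have := List.mem_of_mem_filter hj
  have h := (PySem.List.mem_pyRange_one (a := 0) (b := 48) (x := j)).mp this
  exact ⟨h.1, h.2⟩

lemma syn2_eq (d : List Int) : pvSynSumA d 2 = sqGF (pvSynSumA d 1) := by
  have h := syn_sq_fold 1 2
    (fun j h0 h48 => by
      have := term2N j.toNat (by omega)
      rwa [Int.toNat_of_nonneg h0] at this)
    _ (pv_filter_bounds d) 0 (by norm_num)
  simpa [pvSynSumA, sqGF] using h

lemma syn4_eq (d : List Int) : pvSynSumA d 4 = sqGF (pvSynSumA d 2) := by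
  have h := syn_sq_fold 2 4
    (fun j h0 h48 => by
      have := term4N j.toNat (by omega)
      rwa [Int.toNat_of_nonneg h0] at this)
    _ (pv_filter_bounds d) 0 (by norm_num)
  simpa [pvSynSumA, sqGF] using h

lemma syn_range (d : List Int) (i : Int) : ∃ mo : Nat, mo < 64 ∧ pvSynSumA d i = ((mo : Nat) : Int) := by
  have h := syn_range_fold i ((PySem.List.pyRange 0 48).filter (fun x => PySem.List.pyGetD d x 0 == 1)) 0 (by norm_num)
  simpa [pvSynSumA] using h

-- flip positions / final rendering shared by both factorizations
def pvFlips (d : List Int) (ps : List Int) : List Int :=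
  ps.foldl (fun acc p => acc.set p.toNat (PySem.Int.bxor (PySem.List.pyGetD d p 0) 1)) d

def pvRender (d : List Int) (P : Option (List Int) × List Int) : String × List Int :=
  ((match P.1 with | none => "" | some ps => pvOut (pvFlips d ps)), P.2)

-- A's two-error tail and correction stage with the data abstracted to flip positions
def pvTwoPos (loc : List Int) : Option (List Int) × List Int :=
  if loc.length = 2 then
    (some [PySem.List.pyGetD loc 0 0, PySem.List.pyGetD loc 1 0], loc)
  else (none, [-100])

lemma two_fact (d : List Int) (loc : List Int) :
    pvTwoA d loc = ((pvTwoPos loc).1.map (pvFlips d), (pvTwoPos loc).2) := by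
  unfold pvTwoA pvTwoPos
  split_ifs <;> rfl

-- A's correction stage with the data abstracted to flip positions (same branch structure)
def pvCorrPos (s1 s2 s3v : Int) : Option (List Int) × List Int :=
    if s1 ≠ -1 then
      let s3 := PySem.Int.mod (s1 * 3) 63
      if s3v = s3 then (some [s1], [] ++ [s1])
      else
        let aux := if s3v = -1 then PySem.List.pyGetD pvAlpha s3 0
                   else PySem.Int.bxor (PySem.List.pyGetD pvAlpha s3 0) (PySem.List.pyGetD pvAlpha s3v 0)
        let elp1 := PySem.Int.mod (s2 - PySem.List.pyGetD pvIdx aux 0 + 63) 63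
        let elp2 := PySem.Int.mod (s1 - PySem.List.pyGetD pvIdx aux 0 + 63) 63
        pvTwoPos (pvChienA elp1 elp2)
    else if s2 ≠ -1 then (none, [] ++ [-200])
    else (some [], [])

-- same, with the Chien evaluated over Nat (pointwise equal by chienA_mod)
def pvCorrPosF (s1 s2 s3v : Int) : Option (List Int) × List Int :=
    if s1 ≠ -1 then
      let s3 := PySem.Int.mod (s1 * 3) 63
      if s3v = s3 then (some [s1], [] ++ [s1])
      else
        let aux := if s3v = -1 then PySem.List.pyGetD pvAlpha s3 0
                   else PySem.Int.bxor (PySem.List.pyGetD pvAlpha s3 0) (PySem.List.pyGetD pvAlpha s3v 0)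
        let elp1 := PySem.Int.mod (s2 - PySem.List.pyGetD pvIdx aux 0 + 63) 63
        let elp2 := PySem.Int.mod (s1 - PySem.List.pyGetD pvIdx aux 0 + 63) 63
        pvTwoPos (pvChienFast elp1.toNat elp2.toNat)
    else if s2 ≠ -1 then (none, [] ++ [-200])
    else (some [], [])

lemma corrPos_fast (s1 s2 s3v : Int) : pvCorrPos s1 s2 s3v = pvCorrPosF s1 s2 s3v := by
  unfold pvCorrPos pvCorrPosF
  simp only [chienA_mod]

lemma corrA_fact (d : List Int) (s1 s2 s3v : Int) :
    pvCorrA d s1 s2 s3v = ((pvCorrPos s1 s2 s3v).1.map (pvFlips d), (pvCorrPos s1 s2 s3v).2) := by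
  unfold pvCorrA pvCorrPos
  split_ifs
  all_goals dsimp only
  all_goals try split_ifs
  all_goals try rw [two_fact]
  all_goals rfl

-- A's and B's tails as functions of the two free syndromes
def sideA (v1 v3 : Int) : Option (List Int) × List Int :=
  if v1 = 0 ∧ v3 = 0 then (some [], []) else
  let P := pvCorrPosF (PySem.List.pyGetD pvIdx v1 0) (PySem.List.pyGetD pvIdx (sqGF v1) 0)
    (PySem.List.pyGetD pvIdx v3 0)
  (if (P.2.filter (fun x => decide (x > 47))) ≠ [] then none else P.1,
   P.2.map (fun i => if i < 0 then i else 48 - i - 1))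

def sideB (v1 v3 : Int) : Option (List Int) × List Int :=
  if v1 = 0 then (some [], []) else
  let i1 := PySem.List.pyGetD pvIdx v1 0
  let tt := PySem.Int.mod (3 * i1) 63
  if v3 = PySem.List.pyGetD pvAlpha tt 0 then
    (if [i1].any (fun x => decide (x > 47)) then none else some [i1],
     [i1].map (fun i => 48 - 1 - i))
  else
    let c := PySem.List.pyGetD pvAlpha
      (PySem.Int.mod (PySem.List.pyGetD pvIdx (PySem.Int.bxor v3 (PySem.List.pyGetD pvAlpha tt 0)) 0 - tt) 63) 0
    let w := PySem.List.pyGetD pvRootT c 0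
    if w = -1 then (none, [-100]) else
    let p := PySem.Int.mod (PySem.List.pyGetD pvIdx w 0 + i1) 63
    let q := PySem.Int.mod (PySem.List.pyGetD pvIdx (PySem.Int.bxor w 1) 0 + i1) 63
    let loc := PySem.List.sorted [p, q] (fun r => if r = 0 then (63 : Int) else r) false
    (if loc.any (fun x => decide (x > 47)) then none else
       some [PySem.List.pyGetD loc 0 0, PySem.List.pyGetD loc 1 0],
     loc.map (fun i => 48 - 1 - i))

lemma pv_syn_stage_a (d : List Int) :
    pvSynStageA d =
    ([0, PySem.List.pyGetD pvIdx (pvSynSumA d 1) 0, PySem.List.pyGetD pvIdx (pvSynSumA d 2) 0,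
      PySem.List.pyGetD pvIdx (pvSynSumA d 3) 0, PySem.List.pyGetD pvIdx (pvSynSumA d 4) 0],
     if pvSynSumA d 4 ≠ 0 then true else if pvSynSumA d 3 ≠ 0 then true
     else if pvSynSumA d 2 ≠ 0 then true else if pvSynSumA d 1 ≠ 0 then true else false) := by
  have h5 : PySem.List.pyRange 1 5 = [1, 2, 3, 4] := by decide
  simp [pvSynStageA, h5, List.foldl, List.set]

lemma pv_get5 (a b c e f : Int) : PySem.List.pyGetD [a, b, c, e, f] (1 : Int) 0 = b ∧
    PySem.List.pyGetD [a, b, c, e, f] (2 : Int) 0 = c ∧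
    PySem.List.pyGetD [a, b, c, e, f] (3 : Int) 0 = e := by
  refine ⟨?_, ?_, ?_⟩ <;> simp [PySem.List.pyGetD, PySem.List.pyGet?, PySem.List.pyIdx?]

lemma sq_zero : sqGF 0 = 0 := rfl

-- fast mirrors of the two tails: identical structure, lookups through the packed tables
def sqGF2 (v : Int) : Int :=
  if v = 0 then 0 else alphaI (PySem.Int.mod (2 * idxI v) 63)

def pvCorrPosF2 (s1 s2 s3v : Int) : Option (List Int) × List Int :=
    if s1 ≠ -1 then
      let s3 := PySem.Int.mod (s1 * 3) 63
      if s3v = s3 then (some [s1], [] ++ [s1])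
      else
        let aux := if s3v = -1 then alphaI s3
                   else PySem.Int.bxor (alphaI s3) (alphaI s3v)
        let elp1 := PySem.Int.mod (s2 - idxI aux + 63) 63
        let elp2 := PySem.Int.mod (s1 - idxI aux + 63) 63
        pvTwoPos (pvChienFast elp1.toNat elp2.toNat)
    else if s2 ≠ -1 then (none, [] ++ [-200])
    else (some [], [])

def sideA2 (v1 v3 : Int) : Option (List Int) × List Int :=
  if v1 = 0 ∧ v3 = 0 then (some [], []) else
  let P := pvCorrPosF2 (idxI v1) (idxI (sqGF2 v1)) (idxI v3)
  (if (P.2.filter (fun x => decide (x > 47))) ≠ [] then none else P.1,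
   P.2.map (fun i => if i < 0 then i else 48 - i - 1))

def sideB2 (v1 v3 : Int) : Option (List Int) × List Int :=
  if v1 = 0 then (some [], []) else
  let i1 := idxI v1
  let tt := PySem.Int.mod (3 * i1) 63
  if v3 = alphaI tt then
    (if [i1].any (fun x => decide (x > 47)) then none else some [i1],
     [i1].map (fun i => 48 - 1 - i))
  else
    let c := alphaI (PySem.Int.mod (idxI (PySem.Int.bxor v3 (alphaI tt)) - tt) 63)
    let w := rootI c
    if w = -1 then (none, [-100]) else
    let p := PySem.Int.mod (idxI w + i1) 63
    let q := PySem.Int.mod (idxI (PySem.Int.bxor w 1) + i1) 63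
    let loc := PySem.List.sorted [p, q] (fun r => if r = 0 then (63 : Int) else r) false
    (if loc.any (fun x => decide (x > 47)) then none else
       some [PySem.List.pyGetD loc 0 0, PySem.List.pyGetD loc 1 0],
     loc.map (fun i => 48 - 1 - i))

lemma corrPosF_fast (s1 s2 s3v : Int) (h3a : -1 ≤ s3v) (h3b : s3v < 63) :
    pvCorrPosF s1 s2 s3v = pvCorrPosF2 s1 s2 s3v := by
  unfold pvCorrPosF pvCorrPosF2
  by_cases h1 : s1 ≠ -1
  · rw [if_pos h1, if_pos h1]
    dsimp only
    by_cases h2 : s3v = PySem.Int.mod (s1 * 3) 63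
    · rw [if_pos h2, if_pos h2]
    · rw [if_neg h2, if_neg h2]
      have hm0 : 0 ≤ PySem.Int.mod (s1 * 3) 63 := PySem.Int.mod_nonneg _ (by norm_num)
      have hm1 : PySem.Int.mod (s1 * 3) 63 < 63 := PySem.Int.mod_lt _ (by norm_num)
      rw [alpha_fast _ hm0 (by omega)]
      by_cases h4 : s3v = -1
      · rw [if_pos h4, if_pos h4,
          idx_fast _ (alphaI_bounds _).1 (alphaI_bounds _).2]
      · rw [if_neg h4, if_neg h4, alpha_fast s3v (by omega) (by omega)]
        have hx := bxor_lt64 _ _ (alphaI_bounds (PySem.Int.mod (s1 * 3) 63)).1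
          (alphaI_bounds _).2 (alphaI_bounds s3v).1 (alphaI_bounds _).2
        rw [idx_fast _ hx.1 (by omega)]
  · rw [if_neg h1, if_neg h1]

set_option maxRecDepth 300000 in
lemma sq_lookup_fast : ∀ v < 64,
    PySem.List.pyGetD pvIdx (sqGF ((v : Nat) : Int)) 0 = idxI (sqGF2 ((v : Nat) : Int)) := by decide

lemma sideA_fast : ∀ a < 64, ∀ b < 64,
    sideA ((a : Nat) : Int) ((b : Nat) : Int) = sideA2 ((a : Nat) : Int) ((b : Nat) : Int) := by
  intro a ha b hb
  unfold sideA sideA2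
  by_cases hz : ((a : Nat) : Int) = 0 ∧ ((b : Nat) : Int) = 0
  · rw [if_pos hz, if_pos hz]
  · rw [if_neg hz, if_neg hz]
    dsimp only
    rw [idx_fast ((a : Nat) : Int) (by positivity) (by exact_mod_cast ha),
      idx_fast ((b : Nat) : Int) (by positivity) (by exact_mod_cast hb),
      sq_lookup_fast a ha,
      corrPosF_fast _ _ _ (idxI_bounds _).1 (idxI_bounds _).2]

lemma sideB_fast : ∀ a < 64, ∀ b < 64,
    sideB ((a : Nat) : Int) ((b : Nat) : Int) = sideB2 ((a : Nat) : Int) ((b : Nat) : Int) := by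
  intro a ha b hb
  unfold sideB sideB2
  by_cases hz : ((a : Nat) : Int) = 0
  · rw [if_pos hz, if_pos hz]
  · rw [if_neg hz, if_neg hz]
    dsimp only
    rw [idx_fast ((a : Nat) : Int) (by positivity) (by exact_mod_cast ha)]
    set i1 := idxI ((a : Nat) : Int) with hi1def
    set tt := PySem.Int.mod (3 * i1) 63 with httdef
    have htt0 : 0 ≤ tt := PySem.Int.mod_nonneg _ (by norm_num)
    have htt1 : tt < 63 := PySem.Int.mod_lt _ (by norm_num)
    rw [alpha_fast tt htt0 (by omega)]
    by_cases h1 : ((b : Nat) : Int) = alphaI tt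
    · rw [if_pos h1, if_pos h1]
    · rw [if_neg h1, if_neg h1]
      have hab := alphaI_bounds tt
      have hx : 0 ≤ PySem.Int.bxor ((b : Nat) : Int) (alphaI tt) ∧
          PySem.Int.bxor ((b : Nat) : Int) (alphaI tt) < 64 :=
        bxor_lt64 _ _ (by positivity) (by exact_mod_cast hb) hab.1 hab.2
      rw [idx_fast (PySem.Int.bxor ((b : Nat) : Int) (alphaI tt)) hx.1 (by omega)]
      set u := idxI (PySem.Int.bxor ((b : Nat) : Int) (alphaI tt)) with hudef
      set m2 := PySem.Int.mod (u - tt) 63 with hm2def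
      have hm0 : 0 ≤ m2 := PySem.Int.mod_nonneg _ (by norm_num)
      have hm1 : m2 < 63 := PySem.Int.mod_lt _ (by norm_num)
      rw [alpha_fast m2 hm0 (by omega)]
      have hca := alphaI_bounds m2
      rw [root_fast (alphaI m2) hca.1 hca.2]
      set w := rootI (alphaI m2) with hwdef
      by_cases hw : w = -1
      · rw [if_pos hw, if_pos hw]
      · rw [if_neg hw, if_neg hw]
        have hwb := rootI_bounds (alphaI m2)
        rw [idx_fast w (by omega) (by omega)]
        have hw1 : 0 ≤ PySem.Int.bxor w 1 ∧ PySem.Int.bxor w 1 < 64 :=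
          bxor_lt64 w 1 (by omega) (by omega) (by norm_num) (by norm_num)
        rw [idx_fast (PySem.Int.bxor w 1) hw1.1 (by omega)]

lemma factA (d : List Int) :
    pvRestA d = pvRender d (sideA (pvSynSumA d 1) (pvSynSumA d 3)) := by
  obtain ⟨m1, hm1, e1⟩ := syn_range d 1
  obtain ⟨m3, hm3, e3⟩ := syn_range d 3
  unfold pvRestA
  simp only [pv_syn_stage_a, (pv_get5 _ _ _ _ _).1, (pv_get5 _ _ _ _ _).2.1,
    (pv_get5 _ _ _ _ _).2.2, syn2_eq, syn4_eq]
  have hflag : ((if sqGF (sqGF (pvSynSumA d 1)) ≠ 0 then true else if pvSynSumA d 3 ≠ 0 then true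
      else if sqGF (pvSynSumA d 1) ≠ 0 then true else if pvSynSumA d 1 ≠ 0 then true else false) = false)
      ↔ (pvSynSumA d 1 = 0 ∧ pvSynSumA d 3 = 0) := by
    constructor
    · intro h
      split_ifs at h with h4 h3 h2 h1 <;> simp_all
    · rintro ⟨h1, h3⟩
      rw [h1, sq_zero, sq_zero]
      simp [h3]
  by_cases hz : pvSynSumA d 1 = 0 ∧ pvSynSumA d 3 = 0
  · rw [if_pos (hflag.mpr hz)]
    unfold sideA
    rw [if_pos hz]
    rfl
  · rw [if_neg (fun hf => hz (hflag.mp hf))]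
    unfold sideA
    rw [if_neg hz]
    rw [corrA_fact, corrPos_fast]
    dsimp only
    rcases pvCorrPosF (PySem.List.pyGetD pvIdx (pvSynSumA d 1) 0)
        (PySem.List.pyGetD pvIdx (sqGF (pvSynSumA d 1)) 0)
        (PySem.List.pyGetD pvIdx (pvSynSumA d 3) 0) with ⟨oP, lP⟩
    by_cases hg : (lP.filter (fun x => decide (x > 47))) ≠ []
    · rw [if_pos hg]
      unfold pvRender
      rw [if_pos hg]
    · rw [if_neg hg]
      unfold pvRender
      rw [if_neg hg]
      cases oP <;> rfl

lemma pvSynB_eq (d : List Int) : pvSynB d = (pvSynSumA d 1, pvSynSumA d 3) := by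
  unfold pvSynB pvSynSumA
  rw [PySem.List.foldl_if_eq_foldl_filter (p := fun j => PySem.List.pyGetD d j 0 == 1)
      (f := fun (t : Int × Int) j =>
        (PySem.Int.bxor t.1 (PySem.List.pyGetD pvAlpha (PySem.Int.mod j 63) 0),
         PySem.Int.bxor t.2 (PySem.List.pyGetD pvAlpha (PySem.Int.mod (3 * j) 63) 0)))]
  rw [PySem.List.foldl_prod_mk
      (f := fun (a : Int) j => PySem.Int.bxor a (PySem.List.pyGetD pvAlpha (PySem.Int.mod j 63) 0))
      (g := fun (a : Int) j => PySem.Int.bxor a (PySem.List.pyGetD pvAlpha (PySem.Int.mod (3 * j) 63) 0))]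
  simp [one_mul]

lemma factB (d : List Int) :
    pvRestB d = pvRender d (sideB (pvSynSumA d 1) (pvSynSumA d 3)) := by
  unfold pvRestB sideB pvTailB pvRender
  rw [pvSynB_eq]
  split_ifs
  all_goals dsimp only
  all_goals try split_ifs
  all_goals rfl

set_option maxRecDepth 1000000 in
set_option maxHeartbeats 4000000 in
lemma main_fin : ∀ a < 64, ∀ b < 64,
    sideA2 ((a : Nat) : Int) ((b : Nat) : Int) = sideB2 ((a : Nat) : Int) ((b : Nat) : Int) := by decide

lemma rest_eq (d : List Int) : pvRestA d = pvRestB d := by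
  obtain ⟨m1, hm1, e1⟩ := syn_range d 1
  obtain ⟨m3, hm3, e3⟩ := syn_range d 3
  rw [factA, factB, e1, e3, sideA_fast m1 hm1 m3 hm3, sideB_fast m1 hm1 m3 hm3,
    main_fin m1 hm1 m3 hm3]

-- ===== VERDICT (by name: the statement is the Claim_ definition above) =====
theorem bch_decode_spec : Claim_equal_bch_decode := by
  intro recd _
  unfold Spec_bch_decode bch_decode bch_decode_alt
  have hiff : (recd.toList.length ≠ 48 ∨ (recd.toList.filter (fun c => decide (c ≠ '0') && decide (c ≠ '1'))) ≠ [])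
      ↔ (recd.toList.length ≠ 48 ∨ recd.toList.any (fun c => decide (c ≠ '0') && decide (c ≠ '1')) = true) :=
    or_congr Iff.rfl (pv_filter_ne_nil_iff_any _ _)
  by_cases h : recd.toList.length ≠ 48 ∨ (recd.toList.filter (fun c => decide (c ≠ '0') && decide (c ≠ '1'))) ≠ []
  · rw [if_pos h, if_pos (hiff.mp h)]
  · rw [if_neg h, if_neg (fun hc => h (hiff.mpr hc))]
    exact rest_eq _
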